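-- pv_equiv track=rewrite | github.com/mrcentes/Yaml-AI-Translators | YAML批量AI本地化工具 v1.30.py | clean_translated_text
-- ===== SOURCE A (Python) =====
-- def clean_translated_text(text: str) -> str:
--     """智能清理翻译后的文本"""
--     if not text:
--         return text
--
--     # 统计引号数量
--     double_quotes = text.count('"')
--     single_quotes = text.count("'")
--
--     # 如果引号很少，不需要处理
--     if double_quotes < 2 and single_quotes < 2:
--         return text
--
--     # 找到第二个引号的位置
--     quote_positions = []
--     for i, char in enumerate(text):
--         if char in ['"', "'"]:
--             quote_positions.append(i)
--             if len(quote_positions) >= 2: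
--                 break
--
--     # 如果找到至少两个引号，保留前两个引号之间的内容，清理后面的
--     if len(quote_positions) >= 2:
--         second_quote_pos = quote_positions[1]
--         before = text[:second_quote_pos + 1]
--         after = text[second_quote_pos + 1:]
--         # 清理后面部分的引号和冒号
--         after = after.replace('"', '').replace("'", '').replace(':', '：')
--         return before + after
--
--     return text
-- ===== SOURCE B (Python) =====
-- def clean_translated_text(text: str) -> str:
--     """Single pass: count quotes and build the cleaned output at the same time."""
--     if not text:
--         return text
--     dq = sq = qseen = 0
--     out = []
--     for ch in text:
--         if qseen >= 2:
--             # past the second quote: drop quotes, full-width the colons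
--             if ch == '"':
--                 dq += 1
--             elif ch == "'":
--                 sq += 1
--             elif ch == ':':
--                 out.append('：')
--             else:
--                 out.append(ch)
--         else:
--             out.append(ch)
--             if ch == '"':
--                 dq += 1
--                 qseen += 1
--             elif ch == "'":
--                 sq += 1
--                 qseen += 1
--     if dq >= 2 or sq >= 2:
--         return ''.join(out)
--     return text
-- ===== Notes on version B (the rewrite author's own statement) =====
-- stated objective: alternative
-- what changed: Fused A's five separate traversals (two .count() scans, the enumerate position scan, slicing, and three .replace() passes) into one linear pass that counts quotes and emits the cleaned output character by character.
import Mathlib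
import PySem

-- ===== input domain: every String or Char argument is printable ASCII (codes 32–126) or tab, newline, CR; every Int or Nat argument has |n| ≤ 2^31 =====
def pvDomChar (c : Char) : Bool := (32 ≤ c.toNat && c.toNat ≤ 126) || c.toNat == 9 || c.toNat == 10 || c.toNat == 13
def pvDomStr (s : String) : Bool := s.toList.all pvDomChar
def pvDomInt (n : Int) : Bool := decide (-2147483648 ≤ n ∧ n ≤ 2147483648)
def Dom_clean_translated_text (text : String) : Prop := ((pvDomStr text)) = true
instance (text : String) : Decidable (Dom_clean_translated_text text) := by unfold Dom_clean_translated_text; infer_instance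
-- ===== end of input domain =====

-- B fuses A's several scans (two counts, a position scan, slicing, three replaces) into one
-- pass that counts quotes and builds the cleaned output directly; objective: alternative.

-- ===== PORT A =====
-- the quote-position loop of A (break as soon as two positions are collected)
def cttA_quoteLoop : List (Int × Char) → List Int → List Int
  | [], acc => acc
  | (i, c) :: rest, acc =>
    if c = '"' ∨ c = '\'' then
      let acc2 := acc ++ [i]
      if 2 ≤ acc2.length then acc2 else cttA_quoteLoop rest acc2
    else cttA_quoteLoop rest acc

def clean_translated_text (text : String) : String :=
  let cs := text.toList
  if cs.length = 0 then text
  else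
    let double_quotes := PySem.Chars.count cs ['"']
    let single_quotes := PySem.Chars.count cs ['\'']
    if double_quotes < 2 ∧ single_quotes < 2 then text
    else
      let quote_positions := cttA_quoteLoop (PySem.List.enumerate cs) []
      if 2 ≤ quote_positions.length then
        let second_quote_pos := PySem.List.pyGetD quote_positions 1 0
        let before := PySem.List.slice cs none (some (second_quote_pos + 1))
        let after := PySem.List.slice cs (some (second_quote_pos + 1)) none
        let after2 := PySem.Chars.replace (PySem.Chars.replace
                        (PySem.Chars.replace after ['"'] []) ['\''] []) [':'] ['：']
        String.ofList (before ++ after2)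
      else text

-- ===== PORT B =====
-- one step of B's single pass: state (dq, sq, qseen, out)
def cttB_step (s : Nat × Nat × Nat × List Char) (c : Char) : Nat × Nat × Nat × List Char :=
  let (dq, sq, qseen, out) := s
  if 2 ≤ qseen then
    if c = '"' then (dq + 1, sq, qseen, out)
    else if c = '\'' then (dq, sq + 1, qseen, out)
    else if c = ':' then (dq, sq, qseen, out ++ ['：'])
    else (dq, sq, qseen, out ++ [c])
  else
    let out2 := out ++ [c]
    if c = '"' then (dq + 1, sq, qseen + 1, out2)
    else if c = '\'' then (dq, sq + 1, qseen + 1, out2)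
    else (dq, sq, qseen, out2)

def clean_translated_text_alt (text : String) : String :=
  if text.toList.length = 0 then text
  else
    let r := text.toList.foldl cttB_step (0, 0, 0, [])
    if 2 ≤ r.1 ∨ 2 ≤ r.2.1 then String.ofList r.2.2.2 else text

-- ===== PRECONDITION & SPEC =====
def Spec_clean_translated_text (text : String) (out : String) : Prop := out = clean_translated_text_alt text
instance (text : String) (out : String) : Decidable (Spec_clean_translated_text text out) := by unfold Spec_clean_translated_text; infer_instance

-- ===== CLAIM (what is proved, stated in full; the proofs are below) =====
def Claim_equal_clean_translated_text : Prop := ∀ (text : String), Dom_clean_translated_text text → Spec_clean_translated_text text (clean_translated_text text)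

-- ===== LEMMAS AND PROOFS =====

def cttIsQ (c : Char) : Bool := c = '"' || c = '\''

def cttClean (c : Char) : List Char :=
  if c = '"' ∨ c = '\'' then [] else if c = ':' then ['：'] else [c]

-- reference output of B's pass starting with qseen = q
def cttRef : Nat → List Char → List Char
  | _, [] => []
  | q, c :: cs =>
    if 2 ≤ q then cttClean c ++ cttRef q cs
    else c :: cttRef (if cttIsQ c then q + 1 else q) cs

lemma foldB_dq (cs : List Char) : ∀ dq sq q out,
    (cs.foldl cttB_step (dq, sq, q, out)).1 = dq + cs.count '"' := by
  induction cs with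
  | nil => simp
  | cons c cs ih =>
    intro dq sq q out
    simp only [List.foldl_cons, cttB_step]
    split_ifs with h1 h2 h3 h4 h5 h6 <;>
      simp [ih, *] <;> omega

lemma foldB_sq (cs : List Char) : ∀ dq sq q out,
    (cs.foldl cttB_step (dq, sq, q, out)).2.1 = sq + cs.count '\'' := by
  induction cs with
  | nil => simp
  | cons c cs ih =>
    intro dq sq q out
    simp only [List.foldl_cons, cttB_step]
    split_ifs with h1 h2 h3 h4 h5 h6 <;>
      simp [ih, *] <;> omega

lemma foldB_out (cs : List Char) : ∀ dq sq q out,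
    (cs.foldl cttB_step (dq, sq, q, out)).2.2.2 = out ++ cttRef q cs := by
  induction cs with
  | nil => simp [cttRef]
  | cons c cs ih =>
    intro dq sq q out
    simp only [List.foldl_cons, cttB_step]
    by_cases hd : c = '"'
    · subst hd; by_cases h1 : 2 ≤ q <;> simp [h1, cttRef, cttClean, cttIsQ, ih]
    · by_cases hs : c = '\''
      · subst hs; by_cases h1 : 2 ≤ q <;> simp [h1, cttRef, cttClean, cttIsQ, ih]
      · by_cases hcol : c = ':'
        · subst hcol; by_cases h1 : 2 ≤ q <;> simp [h1, cttRef, cttClean, cttIsQ, ih]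
        · by_cases h1 : 2 ≤ q <;> simp [h1, cttRef, cttClean, cttIsQ, ih, hd, hs, hcol]

lemma countGo_single (a : Char) : ∀ (l : List Char) (fuel : Nat) (acc : Nat),
    l.length ≤ fuel → PySem.Chars.count.go [a] fuel l acc = acc + l.count a := by
  intro l
  induction l with
  | nil => intro fuel acc _; cases fuel <;> simp [PySem.Chars.count.go]
  | cons c t ih =>
    intro fuel acc h
    cases fuel with
    | zero => simp at h
    | succ f =>
      have hle : t.length ≤ f := by simp at h; omega
      simp only [PySem.Chars.count.go]
      by_cases hc : a = c
      · rw [if_pos (by simp [List.isPrefixOf, hc])]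
        simp only [List.length_singleton, List.drop_succ_cons, List.drop_zero]
        rw [ih f (acc + 1) hle]
        simp [hc]
        omega
      · rw [if_neg (by simp [List.isPrefixOf, hc])]
        rw [ih f acc hle]
        have hc' : ¬ c = a := fun h' => hc h'.symm
        simp [hc']

lemma count_single (l : List Char) (a : Char) :
    PySem.Chars.count l [a] = l.count a := by
  simp [PySem.Chars.count, countGo_single a l l.length 0 le_rfl]

lemma replaceGo_single (a : Char) (new : List Char) : ∀ (l : List Char) (fuel : Nat) (acc : List Char),
    l.length ≤ fuel → PySem.Chars.replace.go [a] new fuel l acc =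
      acc.reverse ++ l.flatMap (fun c => if c = a then new else [c]) := by
  intro l
  induction l with
  | nil => intro fuel acc _; cases fuel <;> simp [PySem.Chars.replace.go]
  | cons c t ih =>
    intro fuel acc h
    cases fuel with
    | zero => simp at h
    | succ f =>
      have hle : t.length ≤ f := by simp at h; omega
      simp only [PySem.Chars.replace.go]
      by_cases hc : a = c
      · rw [if_pos (by simp [List.isPrefixOf, hc])]
        simp only [List.length_singleton, List.drop_succ_cons, List.drop_zero]
        rw [ih f (new.reverse ++ acc) hle]
        simp [hc]
      · rw [if_neg (by simp [List.isPrefixOf, hc])]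
        rw [ih f (c :: acc) hle]
        have hc' : ¬ c = a := fun h' => hc h'.symm
        simp [hc']

lemma replace_single (l : List Char) (a : Char) (new : List Char) :
    PySem.Chars.replace l [a] new = l.flatMap (fun c => if c = a then new else [c]) := by
  simp [PySem.Chars.replace, replaceGo_single a new l l.length [] le_rfl]

lemma triple_replace (w : List Char) :
    PySem.Chars.replace (PySem.Chars.replace
      (PySem.Chars.replace w ['"'] []) ['\''] []) [':'] ['：'] = w.flatMap cttClean := by
  induction w with
  | nil => simp [replace_single]
  | cons c t ih =>
    simp only [replace_single] at ih ⊢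
    by_cases h1 : c = '"' <;> by_cases h2 : c = '\'' <;> by_cases h3 : c = ':' <;>
      simp [h1, h2, h3, cttClean, ih]

lemma cttRef_big (q : Nat) (h : 2 ≤ q) : ∀ cs : List Char, cttRef q cs = cs.flatMap cttClean := by
  intro cs
  induction cs with
  | nil => simp [cttRef]
  | cons c t ih => simp [cttRef, h, ih]

lemma cttRef_pass (u : List Char) (hu : ∀ c ∈ u, cttIsQ c = false) :
    ∀ (q : Nat) (rest : List Char), q < 2 → cttRef q (u ++ rest) = u ++ cttRef q rest := by
  induction u with
  | nil => simp
  | cons c t ih =>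
    intro q rest hq
    have hc : cttIsQ c = false := hu c (by simp)
    simp only [List.cons_append, cttRef, hc]
    have := ih (fun x hx => hu x (by simp [hx])) q rest hq
    simp [Nat.not_le.mpr hq, this]

lemma quoteLoop_skip (u : List Char) (hu : ∀ c ∈ u, cttIsQ c = false) :
    ∀ (k : Int) (tail : List (Int × Char)) (acc : List Int),
      cttA_quoteLoop (PySem.List.enumerate u k ++ tail) acc = cttA_quoteLoop tail acc := by
  induction u with
  | nil => simp [PySem.List.enumerate]
  | cons c t ih =>
    intro k tail acc
    have hc : cttIsQ c = false := hu c (by simp)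
    have hc' : ¬ (c = '"' ∨ c = '\'') := by simp [cttIsQ] at hc; tauto
    simp only [PySem.List.enumerate_cons, List.cons_append, cttA_quoteLoop, if_neg hc']
    exact ih (fun x hx => hu x (by simp [hx])) (k + 1) tail acc

lemma quoteLoop_main (u v w : List Char) (q1 q2 : Char)
    (hu : ∀ c ∈ u, cttIsQ c = false) (hv : ∀ c ∈ v, cttIsQ c = false)
    (h1 : cttIsQ q1 = true) (h2 : cttIsQ q2 = true) :
    cttA_quoteLoop (PySem.List.enumerate (u ++ q1 :: v ++ q2 :: w)) [] =
      [(u.length : Int), (u.length : Int) + 1 + v.length] := by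
  have h1' : q1 = '"' ∨ q1 = '\'' := by simp [cttIsQ] at h1; tauto
  have h2' : q2 = '"' ∨ q2 = '\'' := by simp [cttIsQ] at h2; tauto
  rw [show u ++ q1 :: v ++ q2 :: w = u ++ (q1 :: (v ++ q2 :: w)) by simp,
      PySem.List.enumerate_append, quoteLoop_skip u hu]
  rw [PySem.List.enumerate_cons]
  simp only [cttA_quoteLoop, if_pos h1', List.nil_append, List.length_cons, List.length_nil]
  norm_num
  rw [PySem.List.enumerate_append, quoteLoop_skip v hv, PySem.List.enumerate_cons]
  simp only [cttA_quoteLoop, if_pos h2']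
  norm_num

lemma exists_one (cs : List Char) (h : 1 ≤ cs.countP cttIsQ) :
    ∃ v q w, cs = v ++ q :: w ∧ cttIsQ q = true ∧ (∀ c ∈ v, cttIsQ c = false) := by
  induction cs with
  | nil => simp at h
  | cons c t ih =>
    by_cases hc : cttIsQ c = true
    · exact ⟨[], c, t, by simp, hc, by simp⟩
    · have hc' : cttIsQ c = false := by simpa using hc
      simp only [List.countP_cons, hc', Bool.false_eq_true, if_false, Nat.add_zero] at h
      obtain ⟨v, q, w, rfl, hq, hv⟩ := ih h
      exact ⟨c :: v, q, w, by simp, hq, by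
        intro x hx; rcases List.mem_cons.mp hx with rfl | hx; exact hc'; exact hv x hx⟩

lemma exists_two (cs : List Char) (h : 2 ≤ cs.countP cttIsQ) :
    ∃ u q1 v q2 w, cs = u ++ q1 :: v ++ q2 :: w ∧ cttIsQ q1 = true ∧ cttIsQ q2 = true ∧
      (∀ c ∈ u, cttIsQ c = false) ∧ (∀ c ∈ v, cttIsQ c = false) := by
  obtain ⟨u, q1, rest, rfl, hq1, hu⟩ := exists_one cs (by omega)
  have : 1 ≤ rest.countP cttIsQ := by
    rw [List.countP_append, List.countP_cons, hq1] at h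
    simp only [if_true] at h
    have hz : u.countP cttIsQ = 0 := List.countP_eq_zero.mpr (by intro c hc; simp [hu c hc])
    omega
  obtain ⟨v, q2, w, rfl, hq2, hv⟩ := exists_one rest this
  exact ⟨u, q1, v, q2, w, by simp, hq1, hq2, hu, hv⟩

lemma countP_eq (cs : List Char) : cs.countP cttIsQ = cs.count '"' + cs.count '\'' := by
  induction cs with
  | nil => simp
  | cons c t ih =>
    rw [List.countP_cons, List.count_cons, List.count_cons, ih]
    by_cases h1 : c = '"' <;> by_cases h2 : c = '\'' <;> simp [cttIsQ, h1, h2] <;> omega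

lemma cttRef_quote (q : Nat) (c : Char) (cs : List Char) (hq : q < 2) (hc : cttIsQ c = true) :
    cttRef q (c :: cs) = c :: cttRef (q + 1) cs := by
  simp [cttRef, Nat.not_le.mpr hq, hc]

lemma cttRef_decomp (u v w : List Char) (q1 q2 : Char)
    (hu : ∀ c ∈ u, cttIsQ c = false) (hv : ∀ c ∈ v, cttIsQ c = false)
    (h1 : cttIsQ q1 = true) (h2 : cttIsQ q2 = true) :
    cttRef 0 (u ++ q1 :: v ++ q2 :: w) = u ++ q1 :: v ++ q2 :: w.flatMap cttClean := by
  rw [show u ++ q1 :: v ++ q2 :: w = u ++ (q1 :: (v ++ q2 :: w)) by simp,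
      cttRef_pass u hu 0 _ (by omega), cttRef_quote 0 q1 _ (by omega) h1,
      cttRef_pass v hv 1 _ (by omega), cttRef_quote 1 q2 _ (by omega) h2,
      cttRef_big 2 le_rfl]
  simp

lemma pyGetD_pair (a b d : Int) : PySem.List.pyGetD [a, b] 1 d = b := by
  simp [PySem.List.pyGetD, PySem.List.pyGet?, PySem.List.pyIdx?]

-- ===== VERDICT (by name: the statement is the Claim_ definition above) =====
theorem clean_translated_text_spec : Claim_equal_clean_translated_text := by
  unfold Claim_equal_clean_translated_text Spec_clean_translated_text
  intro text _
  by_cases hnil : text.toList.length = 0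
  · simp [clean_translated_text, clean_translated_text_alt, hnil]
  by_cases hg : text.toList.count '"' < 2 ∧ text.toList.count '\'' < 2
  · have hA : clean_translated_text text = text := by
      unfold clean_translated_text
      rw [if_neg hnil, count_single, count_single, if_pos hg]
    have hB : clean_translated_text_alt text = text := by
      unfold clean_translated_text_alt
      rw [if_neg hnil, if_neg (by rw [foldB_dq, foldB_sq]; omega)]
    rw [hA, hB]
  · have hcp : 2 ≤ text.toList.countP cttIsQ := by rw [countP_eq]; omega
    obtain ⟨u, q1, v, q2, w, hdec, hq1, hq2, hu, hv⟩ := exists_two text.toList hcp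
    have hcast : (u.length : Int) + 1 + (v.length : Int) + 1
        = ((u.length + 1 + v.length + 1 : Nat) : Int) := by push_cast; ring
    have hsplit : u ++ q1 :: v ++ q2 :: w = (u ++ q1 :: v ++ [q2]) ++ w := by simp
    have hlen : (u ++ q1 :: v ++ [q2]).length = u.length + 1 + v.length + 1 := by
      simp; omega
    have hA : clean_translated_text text
        = String.ofList ((u ++ q1 :: v ++ [q2]) ++ w.flatMap cttClean) := by
      unfold clean_translated_text
      rw [if_neg hnil, count_single, count_single, if_neg hg, hdec,
          quoteLoop_main u v w q1 q2 hu hv hq1 hq2, if_pos (by simp), pyGetD_pair]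
      dsimp only []
      rw [hcast, PySem.List.slice_to_natCast, PySem.List.slice_from_natCast,
          hsplit, List.take_left' hlen, List.drop_left' hlen, triple_replace]
    have hB : clean_translated_text_alt text = String.ofList (cttRef 0 text.toList) := by
      unfold clean_translated_text_alt
      rw [if_neg hnil, if_pos (by rw [foldB_dq, foldB_sq]; omega), foldB_out]
      simp
    rw [hA, hB, hdec, cttRef_decomp u v w q1 q2 hu hv hq1 hq2]
    simp
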